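-- pv_equiv track=rewrite | github.com/Aklile-Yilma/A2SV-Contest_Repository | contest_18/B_Make_it_Divisible_by_25.py | count
-- ===== SOURCE A (Python) =====
-- def count(n, start):
--     count = len(n) - start - 1
--     for i in range(start-1, -1, -1):
--         # find the other o or 5
--         if n[start] == '0':
--             if n[i] == '0' or n[i] == '5':
--                 break
--
--         # if start is 5 find 7 0r 2
--         if n[start] == '5':
--             if n[i] == '7' or n[i] == '2':
--                 break
--         count += 1
--
--     return count
-- ===== SOURCE B (Python) =====
-- def count(n, start):
--     if start <= 0:
--         return len(n) - start - 1
--     target = {'0': ('0', '5'), '5': ('7', '2')}.get(n[start], ())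
--     j = max((i for i in range(start) if n[i] in target), default=None)
--     return len(n) - 1 if j is None else len(n) - 2 - j
-- ===== Notes on version B (the rewrite author's own statement) =====
-- stated objective: alternative
-- what changed: A scans backwards accumulating a deletion counter with an early break; B first locates the rightmost index before start whose digit belongs to the target set (max over a filtered range) and then computes the answer by the closed formula len(n)-2-j (len(n)-1 / len(n)-start-1 when there is no match / no scan). (constant-factor speedup: the scan runs inside C-level max/filter machinery instead of an interpreted per-character loop)
import Mathlib
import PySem

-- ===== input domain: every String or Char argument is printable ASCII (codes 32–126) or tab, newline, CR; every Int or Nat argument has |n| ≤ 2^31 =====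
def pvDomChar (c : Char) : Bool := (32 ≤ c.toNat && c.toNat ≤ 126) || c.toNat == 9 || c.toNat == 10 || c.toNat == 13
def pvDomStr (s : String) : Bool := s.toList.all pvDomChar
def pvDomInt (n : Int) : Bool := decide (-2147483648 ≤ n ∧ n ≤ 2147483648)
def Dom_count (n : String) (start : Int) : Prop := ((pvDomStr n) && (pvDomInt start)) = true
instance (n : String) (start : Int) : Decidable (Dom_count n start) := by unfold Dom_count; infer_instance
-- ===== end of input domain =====

-- B replaces A's backward scan-with-counter-and-break by locating the rightmost matching
-- index before `start` (a max over a filtered range) and computing the answer by a closed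
-- formula; objective: alternative decomposition, not speed.

-- ===== PORT A =====
-- the for-loop of A: scans the index list, breaks on a match, otherwise increments count
def countLoopA (L : List Char) (s : Int) : List Int → Int → Int
  | [], c => c
  | i :: rest, c =>
    if PySem.List.pyGetD L s ' ' = '0' ∧
        (PySem.List.pyGetD L i ' ' = '0' ∨ PySem.List.pyGetD L i ' ' = '5') then c
    else if PySem.List.pyGetD L s ' ' = '5' ∧
        (PySem.List.pyGetD L i ' ' = '7' ∨ PySem.List.pyGetD L i ' ' = '2') then c
    else countLoopA L s rest (c + 1)

def count (n : String) (start : Int) : Int :=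
  let L := n.toList
  countLoopA L start (PySem.List.pyRange (start - 1) (-1) (-1)) ((L.length : Int) - start - 1)

-- ===== PORT B =====
-- Source B's {'0': ('0','5'), '5': ('7','2')}.get(n[start], ())
def targetOf (sc : Char) : List Char :=
  if sc = '0' then ['0', '5'] else if sc = '5' then ['7', '2'] else []

def count_alt (n : String) (start : Int) : Int :=
  let L := n.toList
  if start ≤ 0 then (L.length : Int) - start - 1
  else
    let target := targetOf (PySem.List.pyGetD L start ' ')
    let js := (PySem.List.pyRange 0 start 1).filter
      (fun i => target.contains (PySem.List.pyGetD L i ' '))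
    match PySem.List.max? js (fun x => x) with
    | none => (L.length : Int) - 1
    | some j => (L.length : Int) - 2 - j

-- ===== PRECONDITION & SPEC =====
-- Pre_ excludes exactly the inputs where A raises IndexError (the loop runs, so 1 ≤ start,
-- and n[start] is out of range); A returns on every admitted input.
def Pre_count (n : String) (start : Int) : Prop :=
  start ≤ 0 ∨ start < (n.toList.length : Int)
instance (n : String) (start : Int) : Decidable (Pre_count n start) := by
  unfold Pre_count; infer_instance

def pvWitness_count : String × Int := ("05", 1)

def Spec_count (n : String) (start : Int) (out : Int) : Prop := out = count_alt n start
instance (n : String) (start : Int) (out : Int) : Decidable (Spec_count n start out) := by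
  unfold Spec_count; infer_instance

-- ===== CLAIM (what is proved, stated in full; the proofs are below) =====
def Claim_equal_count : Prop := ∀ (n : String) (start : Int),
  Dom_count n start → Pre_count n start → Spec_count n start (count n start)

-- ===== LEMMAS AND PROOFS =====

-- the break predicate of A's loop body, phrased as B phrases it
def brkB (L : List Char) (s i : Int) : Bool :=
  (targetOf (PySem.List.pyGetD L s ' ')).contains (PySem.List.pyGetD L i ' ')

lemma brk_iff (L : List Char) (s i : Int) :
    brkB L s i = true ↔
      ((PySem.List.pyGetD L s ' ' = '0' ∧
          (PySem.List.pyGetD L i ' ' = '0' ∨ PySem.List.pyGetD L i ' ' = '5')) ∨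
        (PySem.List.pyGetD L s ' ' = '5' ∧
          (PySem.List.pyGetD L i ' ' = '7' ∨ PySem.List.pyGetD L i ' ' = '2'))) := by
  by_cases h0 : PySem.List.pyGetD L s ' ' = '0' <;>
    by_cases h5 : PySem.List.pyGetD L s ' ' = '5' <;>
      simp [brkB, targetOf, h0, h5]

-- the greatest j < k with brkB, computed from the top
def findMax (L : List Char) (s : Int) : Nat → Option Nat
  | 0 => none
  | k + 1 => if brkB L s (k : Int) = true then some k else findMax L s k

lemma findMax_none (L : List Char) (s : Int) :
    ∀ k : Nat, findMax L s k = none ↔ ∀ j : Nat, j < k → brkB L s (j : Int) = false := by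
  intro k
  induction k with
  | zero => simp [findMax]
  | succ k ih =>
    by_cases hb : brkB L s (k : Int) = true
    · rw [findMax, if_pos hb]
      constructor
      · intro h; exact absurd h (by simp)
      · intro h; exact absurd (h k (Nat.lt_succ_self k)) (by simp [hb])
    · rw [findMax, if_neg hb, ih]
      constructor
      · intro h j hj
        rcases Nat.lt_succ_iff_lt_or_eq.mp hj with h' | h'
        · exact h j h'
        · subst h'
          simpa using hb
      · intro h j hj; exact h j (Nat.lt_succ_of_lt hj)

lemma findMax_some (L : List Char) (s : Int) :
    ∀ k j : Nat, findMax L s k = some j →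
      brkB L s (j : Int) = true ∧ j < k ∧
        ∀ i : Nat, j < i → i < k → brkB L s (i : Int) = false := by
  intro k
  induction k with
  | zero => intro j h; exact absurd h (by simp [findMax])
  | succ k ih =>
    intro j h
    by_cases hb : brkB L s (k : Int) = true
    · rw [findMax, if_pos hb] at h
      injection h with h; subst h
      exact ⟨hb, Nat.lt_succ_self _, fun i hji hik => absurd hik (by omega)⟩
    · rw [findMax, if_neg hb] at h
      obtain ⟨h1, h2, h3⟩ := ih j h
      refine ⟨h1, Nat.lt_succ_of_lt h2, fun i hji hik => ?_⟩
      rcases Nat.lt_succ_iff_lt_or_eq.mp hik with h' | h'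
      · exact h3 i hji h'
      · subst h'
        simpa using hb

-- A's loop over [k-1, …, 0], characterised by findMax
lemma loopA_eq (L : List Char) (s : Int) :
    ∀ (k : Nat) (c : Int),
      countLoopA L s (PySem.List.pyRange ((k : Int) - 1) (-1) (-1)) c =
        match findMax L s k with
        | some j => c + ((k : Int) - 1 - (j : Int))
        | none => c + (k : Int) := by
  intro k
  induction k with
  | zero =>
    intro c
    rw [PySem.List.pyRange_neg_one_eq_nil (by omega)]
    simp [countLoopA, findMax]
  | succ k ih =>
    intro c
    have hcons : PySem.List.pyRange (((k + 1 : Nat) : Int) - 1) (-1) (-1) =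
        (k : Int) :: PySem.List.pyRange ((k : Int) - 1) (-1) (-1) := by
      have h1 : (((k + 1 : Nat) : Int) - 1) = (k : Int) := by push_cast; ring
      rw [h1, PySem.List.pyRange_neg_one_cons (by omega)]
    rw [hcons]
    have hf : findMax L s (k + 1) =
        if brkB L s (k : Int) = true then some k else findMax L s k := rfl
    rw [hf]
    by_cases hb : brkB L s (k : Int) = true
    · rw [if_pos hb]
      have hnomatch : countLoopA L s ((k : Int) :: PySem.List.pyRange ((k : Int) - 1) (-1) (-1)) c = c := by
        rcases (brk_iff L s (k : Int)).mp hb with h | h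
        · rw [countLoopA, if_pos h]
        · by_cases h1 : PySem.List.pyGetD L s ' ' = '0' ∧
              (PySem.List.pyGetD L (k : Int) ' ' = '0' ∨ PySem.List.pyGetD L (k : Int) ' ' = '5')
          · rw [countLoopA, if_pos h1]
          · rw [countLoopA, if_neg h1, if_pos h]
      rw [hnomatch]
      push_cast; ring
    · rw [if_neg hb]
      have hnot := fun h => hb ((brk_iff L s (k : Int)).mpr h)
      rw [countLoopA, if_neg (fun h => hnot (Or.inl h)), if_neg (fun h => hnot (Or.inr h)),
        ih (c + 1)]
      cases h : findMax L s k with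
      | none => push_cast; ring
      | some j => push_cast; ring

-- B's filtered index list
lemma mem_js (L : List Char) (s : Int) (k : Nat) (i : Int) :
    i ∈ (PySem.List.pyRange 0 (k : Int) 1).filter (fun i => brkB L s i) ↔
      (0 ≤ i ∧ i < (k : Int)) ∧ brkB L s i = true := by
  simp [List.mem_filter, PySem.List.mem_pyRange_one]

-- B's max over the filtered range is findMax
lemma maxjs_eq (L : List Char) (s : Int) (k : Nat) :
    PySem.List.max? ((PySem.List.pyRange 0 (k : Int) 1).filter (fun i => brkB L s i))
        (fun x => x) =
      Option.map (fun j : Nat => (j : Int)) (findMax L s k) := by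
  cases h : findMax L s k with
  | none =>
    rw [Option.map_none, PySem.List.max?_eq_none_iff, List.filter_eq_nil_iff]
    intro i hi
    rw [PySem.List.mem_pyRange_one] at hi
    have hfm := (findMax_none L s k).mp h i.toNat (by omega)
    have hcast : ((i.toNat : Nat) : Int) = i := by omega
    rw [hcast] at hfm
    simp [hfm]
  | some j =>
    rw [Option.map_some]
    obtain ⟨hbj, hjk, hmax⟩ := findMax_some L s k j h
    have hjmem : (j : Int) ∈ (PySem.List.pyRange 0 (k : Int) 1).filter
        (fun i => brkB L s i) := by
      rw [mem_js]
      exact ⟨⟨by positivity, by exact_mod_cast hjk⟩, hbj⟩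
    cases h2 : PySem.List.max? ((PySem.List.pyRange 0 (k : Int) 1).filter
        (fun i => brkB L s i)) (fun x => x) with
    | none =>
      rw [PySem.List.max?_eq_none_iff] at h2
      rw [h2] at hjmem
      exact absurd hjmem (by simp)
    | some m =>
      have hmm := PySem.List.max?_mem h2
      rw [mem_js] at hmm
      obtain ⟨⟨hm0, hmk⟩, hbm⟩ := hmm
      have hle : (j : Int) ≤ m := PySem.List.max?_isMax h2 _ hjmem
      have hnlt : ¬ (j : Int) < m := by
        intro hlt
        have hfm := hmax m.toNat (by omega) (by omega)
        have hcast : ((m.toNat : Nat) : Int) = m := by omega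
        rw [hcast] at hfm
        rw [hfm] at hbm
        exact absurd hbm (by simp)
      have : m = (j : Int) := by omega
      rw [this]

-- ===== VERDICT (by name: the statement is the Claim_ definition above) =====
theorem count_spec : Claim_equal_count := by
  intro n start _ _
  unfold Spec_count
  simp only [count, count_alt]
  by_cases hs : start ≤ 0
  · rw [PySem.List.pyRange_neg_one_eq_nil (by omega), if_pos hs]
    simp [countLoopA]
  · rw [if_neg hs]
    have hk : ((start.toNat : Nat) : Int) = start := Int.toNat_of_nonneg (by omega)
    have hloop := loopA_eq n.toList start start.toNat ((n.toList.length : Int) - start - 1)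
    rw [hk] at hloop
    rw [hloop]
    have hfun : (fun i => (targetOf (PySem.List.pyGetD n.toList start ' ')).contains
        (PySem.List.pyGetD n.toList i ' ')) = (fun i => brkB n.toList start i) := rfl
    have hmax := maxjs_eq n.toList start start.toNat
    rw [hk] at hmax
    rw [hfun, hmax]
    cases h : findMax n.toList start start.toNat with
    | none =>
      simp only [Option.map_none]
      ring
    | some j =>
      simp only [Option.map_some]
      ring
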